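-- pv_equiv track=rewrite | github.com/j-bernardi/pessimistic-agents | faithful/ints_to_str.py | int_to_k_ints
-- ===== SOURCE A (Python) =====
-- import math
--
-- def int_to_k_ints(i, k):
--     sums = []
--     i_prime = i
--     for j in range(k, 0, -1):
--         n = highest_n_choose_k_below_x(i_prime, j)
--         sums.append(n - j + 1) # +/- 1
--         i_prime -= n_choose_k(n, j)
--     sums.append(0)
--     return [sums[j] - sums[j+1] for j in range(k)]
--
-- def highest_n_choose_k_below_x(x, k):
--     n = k
--     while True:
--         if n_choose_k(n, k) > x:
--             break
--         n += 1
--     n -= 1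
--     return n
--
-- def n_choose_k(n, k):
--     prod = 1
--     for i in range(k):
--         prod *= n - i
--     return prod // math.factorial(k)
-- ===== SOURCE B (Python) =====
-- import math
--
-- def int_to_k_ints(i, k):
--     res = []
--     rem = i
--     prev = None
--     for j in range(k, 0, -1):
--         # binary search: largest n in [j-1, j+max(rem,0)] with comb(n, j) <= rem
--         # (comb(j-1, j) = 0; n = j-1 is the floor answer when rem < 0)
--         lo, hi = j - 1, j + max(rem, 0)
--         while hi - lo > 1:
--             mid = (lo + hi) // 2
--             if math.comb(mid, j) <= rem:
--                 lo = mid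
--             else:
--                 hi = mid
--         n = lo
--         cur = n - j + 1
--         if prev is not None:
--             res.append(prev - cur)
--         prev = cur
--         rem -= math.comb(n, j)
--     if prev is not None:
--         res.append(prev)
--     return res
-- ===== Notes on version B (the rewrite author's own statement) =====
-- stated objective: faster
-- what changed: Each digit's largest n with C(n,j) <= x is found by binary search over the monotone predicate (using math.comb) instead of A's linear scan that recomputes a falling-factorial product at every step, and the output differences are emitted in one pass instead of building the sums list and re-indexing it.
import Mathlib
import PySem

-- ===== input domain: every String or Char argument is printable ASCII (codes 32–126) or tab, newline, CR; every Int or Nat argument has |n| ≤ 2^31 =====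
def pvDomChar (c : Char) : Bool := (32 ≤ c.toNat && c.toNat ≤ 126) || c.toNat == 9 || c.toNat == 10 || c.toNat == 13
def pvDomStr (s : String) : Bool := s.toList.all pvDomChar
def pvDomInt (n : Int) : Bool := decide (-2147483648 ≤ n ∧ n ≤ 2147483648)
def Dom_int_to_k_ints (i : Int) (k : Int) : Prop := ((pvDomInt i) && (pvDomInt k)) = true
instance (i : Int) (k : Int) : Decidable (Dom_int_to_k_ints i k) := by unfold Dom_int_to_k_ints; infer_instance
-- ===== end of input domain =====

-- B replaces A's linear scan for the largest n with C(n,k) ≤ x by a binary search and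
-- math.comb, and emits the adjacent differences in one pass (objective: faster).


-- ===== PORT A =====
-- math.factorial(m): exact for m ≥ 0; A only calls it with m = j ≥ 1
def pyFactorial (m : Int) : Int := (Nat.factorial m.toNat : Int)

def n_choose_k (n k : Int) : Int :=
  let prod := (PySem.List.pyRange 0 k 1).foldl (fun p i => p * (n - i)) 1
  PySem.Int.floordiv prod (pyFactorial k)

-- the 'while True' loop of highest_n_choose_k_below_x; fuel x.toNat + 1 always
-- suffices (proved in highest_spec below), so fuel exhaustion is unreachable
def highestLoopA (x k : Int) : Nat → Int → Int
  | 0, n => n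
  | fuel + 1, n => if n_choose_k n k > x then n else highestLoopA x k fuel (n + 1)

def highest_n_choose_k_below_x (x k : Int) : Int :=
  highestLoopA x k (x.toNat + 1) k - 1

def stepA (st : List Int × Int) (j : Int) : List Int × Int :=
  let n := highest_n_choose_k_below_x st.2 j
  (st.1 ++ [n - j + 1], st.2 - n_choose_k n j)

def int_to_k_ints (i : Int) (k : Int) : List Int :=
  let st := (PySem.List.pyRange k 0 (-1)).foldl stepA ([], i)
  let sums := st.1 ++ [0]
  -- sums[j] / sums[j+1]: always in range (sums has length k+1, 0 ≤ j < k),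
  -- so the pyGetD default is never taken — exact
  (PySem.List.pyRange 0 k 1).map
    (fun j => PySem.List.pyGetD sums j 0 - PySem.List.pyGetD sums (j + 1) 0)

-- ===== PORT B =====
-- math.comb(n, k): exact for n, k ≥ 0; B only calls it with n ≥ j - 1 ≥ 0, k = j ≥ 1
def pyComb (n k : Int) : Int := (n.toNat.choose k.toNat : Int)

def bsLoop (rem j lo hi : Int) : Int :=
  if h : hi - lo > 1 then
    let mid := PySem.Int.floordiv (lo + hi) 2
    if pyComb mid j ≤ rem then bsLoop rem j mid hi else bsLoop rem j lo mid
  else lo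
termination_by (hi - lo).toNat
decreasing_by
  all_goals
    have hb := PySem.Int.floordiv_eq_iff_of_pos (a := lo + hi) (b := 2) (q := PySem.Int.floordiv (lo + hi) 2) (by norm_num) |>.mp rfl
    omega

def stepB (st : List Int × Option Int × Int) (j : Int) : List Int × Option Int × Int :=
  let rem := st.2.2
  let n := bsLoop rem j (j - 1) (j + max rem 0)
  let cur := n - j + 1
  let res := match st.2.1 with
    | none => st.1
    | some p => st.1 ++ [p - cur]
  (res, some cur, rem - pyComb n j)

def int_to_k_ints_alt (i : Int) (k : Int) : List Int :=
  let st := (PySem.List.pyRange k 0 (-1)).foldl stepB ([], none, i)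
  match st.2.1 with
  | none => st.1
  | some p => st.1 ++ [p]

-- ===== PRECONDITION & SPEC =====
def Spec_int_to_k_ints (i : Int) (k : Int) (out : List Int) : Prop := out = int_to_k_ints_alt i k
instance (i : Int) (k : Int) (out : List Int) : Decidable (Spec_int_to_k_ints i k out) := by unfold Spec_int_to_k_ints; infer_instance

-- ===== CLAIM (what is proved, stated in full; the proofs are below) =====
def Claim_equal_int_to_k_ints : Prop := ∀ (i : Int) (k : Int), Dom_int_to_k_ints i k → Spec_int_to_k_ints i k (int_to_k_ints i k)

-- ===== LEMMAS AND PROOFS =====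

-- the falling-factorial product of A's n_choose_k, as a Nat.descFactorial
lemma prod_range_eq_descFactorial (m : Nat) (n : Int) (hn : 0 ≤ n) :
    (List.range m).foldl (fun p (t : Nat) => p * (n - t)) 1 = (n.toNat.descFactorial m : Int) := by
  induction m with
  | zero => simp [Nat.descFactorial]
  | succ m ih =>
    rw [List.range_succ, List.foldl_append, ih]
    simp only [List.foldl_cons, List.foldl_nil, Nat.descFactorial_succ]
    by_cases hm : m < n.toNat
    · have hc : ((n.toNat - m : Nat) : Int) = n - m := by omega
      rw [Nat.cast_mul, hc]
      ring
    · by_cases hm2 : m = n.toNat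
      · have h0' : n.toNat - m = 0 := by omega
        have hz : n - (m : Int) = 0 := by omega
        rw [hz, mul_zero, h0', Nat.zero_mul, Nat.cast_zero]
      · have h0 : n.toNat.descFactorial m = 0 :=
          Nat.descFactorial_eq_zero_iff_lt.mpr (by omega)
        simp [h0]

lemma nck_eq_pyComb (n j : Int) (hn : 0 ≤ n) (hj : 1 ≤ j) :
    n_choose_k n j = pyComb n j := by
  simp only [n_choose_k, pyComb, pyFactorial]
  rw [PySem.List.pyRange_one, List.foldl_map]
  simp only [zero_add, sub_zero]
  rw [prod_range_eq_descFactorial j.toNat n hn]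
  rw [PySem.Int.floordiv_eq_ediv_of_pos (by exact_mod_cast Nat.factorial_pos j.toNat)]
  rw [← Int.natCast_div]
  rw [Nat.choose_eq_descFactorial_div_factorial]

-- C(n, j) ≥ n - j + 1 for 1 ≤ j ≤ n
lemma choose_lb (j : Nat) (hj : 1 ≤ j) : ∀ n : Nat, j ≤ n → n - j + 1 ≤ n.choose j := by
  intro n
  induction n with
  | zero => intro h; omega
  | succ n ih =>
    intro h
    by_cases hn : j ≤ n
    · have h1 := ih hn
      have h2 : 0 < n.choose (j - 1) := Nat.choose_pos (by omega)
      have hj1 : j - 1 + 1 = j := by omega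
      have h3 := Nat.choose_succ_succ n (j - 1)
      simp only [Nat.succ_eq_add_one, hj1] at h3
      omega
    · have hnj : n + 1 = j := by omega
      rw [hnj, Nat.choose_self]
      omega

-- what both searches compute: the floor inverse of n ↦ C(n, j) at rem
def SearchSpec (rem j r : Int) : Prop :=
  j - 1 ≤ r ∧ (r = j - 1 ∨ pyComb r j ≤ rem) ∧ rem < pyComb (r + 1) j

lemma pyComb_mono (j a b : Int) (ha : 0 ≤ a) (hab : a ≤ b) : pyComb a j ≤ pyComb b j := by
  unfold pyComb
  exact_mod_cast Nat.choose_le_choose j.toNat (by omega)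

lemma searchSpec_unique (rem j r1 r2 : Int) (hj : 1 ≤ j)
    (h1 : SearchSpec rem j r1) (h2 : SearchSpec rem j r2) : r1 = r2 := by
  obtain ⟨hb1, hc1, hu1⟩ := h1
  obtain ⟨hb2, hc2, hu2⟩ := h2
  by_contra hne
  rcases lt_or_gt_of_ne hne with hlt | hlt
  · have hc2' : pyComb r2 j ≤ rem := hc2.resolve_left (by omega)
    have := pyComb_mono j (r1 + 1) r2 (by omega) (by omega)
    omega
  · have hc1' : pyComb r1 j ≤ rem := hc1.resolve_left (by omega)
    have := pyComb_mono j (r2 + 1) r1 (by omega) (by omega)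
    omega

lemma hiBound (rem j : Int) (hj : 1 ≤ j) : rem < pyComb (j + max rem 0) j := by
  unfold pyComb
  by_cases hr : rem ≤ 0
  · have : max rem 0 = 0 := by omega
    rw [this]
    simp only [add_zero, Nat.choose_self]
    · omega
  · have hm : (j + max rem 0).toNat = j.toNat + rem.toNat := by omega
    rw [hm]
    have := choose_lb j.toNat (by omega) (j.toNat + rem.toNat) (by omega)
    omega

lemma bs_spec (rem j : Int) (hj : 1 ≤ j) :
    ∀ (d : Nat) (lo hi : Int), (hi - lo).toNat ≤ d → j - 1 ≤ lo → lo < hi →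
      (lo = j - 1 ∨ pyComb lo j ≤ rem) → rem < pyComb hi j →
      SearchSpec rem j (bsLoop rem j lo hi) := by
  intro d
  induction d with
  | zero => intro lo hi hd hlo hlh hc hhi; omega
  | succ d ih =>
    intro lo hi hd hlo hlh hc hhi
    rw [bsLoop]
    by_cases h : hi - lo > 1
    · rw [dif_pos h]
      have hb := PySem.Int.floordiv_eq_iff_of_pos
        (a := lo + hi) (b := 2) (q := PySem.Int.floordiv (lo + hi) 2) (by norm_num) |>.mp rfl
      set mid := PySem.Int.floordiv (lo + hi) 2 with hmid
      by_cases hif : pyComb mid j ≤ rem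
      · rw [if_pos hif]
        exact ih mid hi (by omega) (by omega) (by omega) (Or.inr hif) hhi
      · rw [if_neg hif]
        exact ih lo mid (by omega) hlo (by omega) hc (by omega)
    · rw [dif_neg h]
      have hhi' : hi = lo + 1 := by omega
      exact ⟨hlo, hc, by rw [← hhi']; exact hhi⟩

lemma loopA_spec (x j : Int) (hj : 1 ≤ j) :
    ∀ (fuel : Nat) (n : Int), j ≤ n → x < n_choose_k (n + fuel) j →
      n ≤ highestLoopA x j fuel n ∧ x < n_choose_k (highestLoopA x j fuel n) j ∧
        ∀ m, n ≤ m → m < highestLoopA x j fuel n → n_choose_k m j ≤ x := by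
  intro fuel
  induction fuel with
  | zero =>
    intro n hn hx
    simp only [highestLoopA]
    refine ⟨le_refl n, by simpa using hx, fun m h1 h2 => by omega⟩
  | succ fuel ih =>
    intro n hn hx
    simp only [highestLoopA]
    by_cases hbr : n_choose_k n j > x
    · rw [if_pos hbr]
      exact ⟨le_refl n, hbr, fun m h1 h2 => by omega⟩
    · rw [if_neg hbr]
      have hx' : x < n_choose_k ((n + 1) + fuel) j := by
        have : (n + 1) + (fuel : Int) = n + (fuel + 1 : Nat) := by push_cast; ring
        rw [this]; exact hx
      obtain ⟨h1, h2, h3⟩ := ih (n + 1) (by omega) hx'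
      refine ⟨by omega, h2, fun m hm1 hm2 => ?_⟩
      by_cases hm : m = n
      · rw [hm]; omega
      · exact h3 m (by omega) hm2

lemma highest_spec (x j : Int) (hj : 1 ≤ j) :
    SearchSpec x j (highest_n_choose_k_below_x x j) := by
  unfold highest_n_choose_k_below_x
  have hfuel : x < n_choose_k (j + (x.toNat + 1 : Nat)) j := by
    rw [nck_eq_pyComb _ _ (by omega) hj]
    unfold pyComb
    have h1 := choose_lb j.toNat (by omega) ((j + (x.toNat + 1 : Nat)).toNat) (by omega)
    omega
  obtain ⟨h1, h2, h3⟩ := loopA_spec x j hj (x.toNat + 1) j (le_refl j) hfuel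
  set r := highestLoopA x j (x.toNat + 1) j with hr
  refine ⟨by omega, ?_, ?_⟩
  · by_cases hrj : r = j
    · left; omega
    · right
      have := h3 (r - 1) (by omega) (by omega)
      rwa [nck_eq_pyComb _ _ (by omega) hj] at this
  · have : r - 1 + 1 = r := by ring
    rw [this, ← nck_eq_pyComb _ _ (by omega) hj]
    exact h2

-- the two searches agree, and so do the chosen binomial values
lemma step_search_eq (rem j : Int) (hj : 1 ≤ j) :
    highest_n_choose_k_below_x rem j = bsLoop rem j (j - 1) (j + max rem 0) := by
  apply searchSpec_unique rem j _ _ hj (highest_spec rem j hj)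
  exact bs_spec rem j hj (max rem 0 + 1).toNat (j - 1) (j + max rem 0)
    (by omega) (le_refl _) (by omega) (Or.inl rfl) (hiBound rem j hj)

-- adjacent differences [xs[t] - xs[t+1]]
def pairDiffs : List Int → List Int
  | a :: b :: t => (a - b) :: pairDiffs (b :: t)
  | _ => []

lemma pairDiffs_append_last : ∀ (xs : List Int) (p y : Int), xs.getLast? = some p →
    pairDiffs (xs ++ [y]) = pairDiffs xs ++ [p - y] := by
  intro xs
  induction xs with
  | nil => intro p y h; simp at h
  | cons a t ih =>
    intro p y h
    cases t with
    | nil =>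
      simp at h
      subst h
      simp [pairDiffs]
    | cons b t' =>
      have h' : (b :: t').getLast? = some p := by
        rwa [List.getLast?_cons_cons] at h
      have := ih p y h'
      simp only [List.cons_append, pairDiffs] at *
      rw [this]

def StInv (sA res : List Int) (prev : Option Int) : Prop :=
  (prev = none ∧ sA = [] ∧ res = []) ∨
  (∃ p, prev = some p ∧ sA.getLast? = some p ∧ res = pairDiffs sA)

lemma fold_rel : ∀ (L : List Int), (∀ j ∈ L, 1 ≤ j) →
    ∀ (sA res : List Int) (prev : Option Int) (rem : Int), StInv sA res prev →
      (L.foldl stepA (sA, rem)).2 = (L.foldl stepB (res, prev, rem)).2.2 ∧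
      StInv (L.foldl stepA (sA, rem)).1 (L.foldl stepB (res, prev, rem)).1
        (L.foldl stepB (res, prev, rem)).2.1 ∧
      (L.foldl stepA (sA, rem)).1.length = sA.length + L.length := by
  intro L
  induction L with
  | nil =>
    intro _ sA res prev rem hI
    exact ⟨rfl, hI, rfl⟩
  | cons j T ih =>
    intro hmem sA res prev rem hI
    have hj : 1 ≤ j := hmem j (List.mem_cons_self ..)
    have hmem' : ∀ x ∈ T, 1 ≤ x := fun x hx => hmem x (List.mem_cons_of_mem _ hx)
    simp only [List.foldl_cons]
    have hn : highest_n_choose_k_below_x rem j = bsLoop rem j (j - 1) (j + max rem 0) :=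
      step_search_eq rem j hj
    set n := bsLoop rem j (j - 1) (j + max rem 0) with hndef
    have hspec := bs_spec rem j hj (max rem 0 + 1).toNat (j - 1) (j + max rem 0)
      (by omega) (le_refl _) (by omega) (Or.inl rfl) (hiBound rem j hj)
    have hn0 : 0 ≤ n := by have := hspec.1; omega
    have hA : stepA (sA, rem) j = (sA ++ [n - j + 1], rem - pyComb n j) := by
      simp only [stepA, hn]
      rw [nck_eq_pyComb n j hn0 hj]
    rcases hI with ⟨hp, hsa, hres⟩ | ⟨p, hp, hlast, hres⟩
    · subst hp; subst hsa; subst hres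
      rw [hA]
      have hB : stepB ([], none, rem) j = ([], some (n - j + 1), rem - pyComb n j) := rfl
      rw [hB]
      have hI' : StInv ([] ++ [n - j + 1]) [] (some (n - j + 1)) :=
        Or.inr ⟨n - j + 1, rfl, by simp, by simp [pairDiffs]⟩
      obtain ⟨c1, c2, c3⟩ := ih hmem' ([] ++ [n - j + 1]) [] (some (n - j + 1))
        (rem - pyComb n j) hI'
      exact ⟨c1, c2, by rw [c3]; simp only [List.length_append, List.length_cons, List.length_nil]; omega⟩
    · subst hp; subst hres
      rw [hA]
      have hB : stepB (pairDiffs sA, some p, rem) j =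
          (pairDiffs sA ++ [p - (n - j + 1)], some (n - j + 1), rem - pyComb n j) := rfl
      rw [hB]
      have hI' : StInv (sA ++ [n - j + 1]) (pairDiffs sA ++ [p - (n - j + 1)])
          (some (n - j + 1)) :=
        Or.inr ⟨n - j + 1, rfl, by simp,
          (pairDiffs_append_last sA p (n - j + 1) hlast).symm⟩
      obtain ⟨c1, c2, c3⟩ := ih hmem' (sA ++ [n - j + 1]) (pairDiffs sA ++ [p - (n - j + 1)])
        (some (n - j + 1)) (rem - pyComb n j) hI'
      exact ⟨c1, c2, by rw [c3]; simp only [List.length_append, List.length_cons, List.length_nil]; omega⟩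

lemma map_pyRange_pairDiffs : ∀ (m : Nat) (xs : List Int), xs.length = m + 1 →
    (PySem.List.pyRange 0 (m : Int) 1).map
      (fun j => PySem.List.pyGetD xs j 0 - PySem.List.pyGetD xs (j + 1) 0) = pairDiffs xs := by
  intro m
  induction m with
  | zero =>
    intro xs hlen
    match xs with
    | [a] => simp [PySem.List.pyRange_one, pairDiffs]
  | succ m ih =>
    intro xs hlen
    match xs with
    | a :: b :: t =>
      have hlen' : (b :: t).length = m + 1 := by
        simp only [List.length_cons] at hlen ⊢; omega
      have hih := ih (b :: t) hlen'
      rw [PySem.List.pyRange_one] at hih ⊢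
      simp only [sub_zero, Int.toNat_natCast, zero_add, List.map_map] at hih ⊢
      rw [List.range_succ_eq_map]
      simp only [List.map_cons, List.map_map]
      refine List.cons_eq_cons.mpr ⟨?_, ?_⟩
      · show PySem.List.pyGetD (a :: b :: t) (((0 : Nat) : Int)) 0 -
            PySem.List.pyGetD (a :: b :: t) (((0 : Nat) : Int) + 1) 0 = a - b
        have h1 : ((0 : Nat) : Int) + 1 = ((1 : Nat) : Int) := by norm_num
        rw [h1, PySem.List.pyGetD_natCast, PySem.List.pyGetD_natCast]
        rfl
      · rw [← hih]
        apply List.map_congr_left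
        intro k hk
        show PySem.List.pyGetD (a :: b :: t) ((k.succ : Nat) : Int) 0 -
            PySem.List.pyGetD (a :: b :: t) (((k.succ : Nat) : Int) + 1) 0 =
          PySem.List.pyGetD (b :: t) ((k : Nat) : Int) 0 -
            PySem.List.pyGetD (b :: t) (((k : Nat) : Int) + 1) 0
        have h1 : ((k.succ : Nat) : Int) + 1 = ((k + 2 : Nat) : Int) := by push_cast; ring
        have h2 : ((k : Nat) : Int) + 1 = ((k + 1 : Nat) : Int) := by push_cast; ring
        rw [h1, h2, PySem.List.pyGetD_natCast, PySem.List.pyGetD_natCast,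
          PySem.List.pyGetD_natCast, PySem.List.pyGetD_natCast]
        simp [List.getD]
    | [a] => simp at hlen

-- ===== VERDICT (by name: the statement is the Claim_ definition above) =====
theorem int_to_k_ints_spec : Claim_equal_int_to_k_ints := by
  intro i k _
  unfold Spec_int_to_k_ints int_to_k_ints int_to_k_ints_alt
  by_cases hk : k ≤ 0
  · rw [PySem.List.pyRange_neg_one_eq_nil hk, PySem.List.pyRange_one_eq_nil hk]
    simp
  · push_neg at hk
    have hmem : ∀ j ∈ PySem.List.pyRange k 0 (-1), 1 ≤ j := by
      intro j hj
      have := (PySem.List.mem_pyRange_neg_one).mp hj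
      omega
    obtain ⟨hrem, hInv, hlen⟩ := fold_rel (PySem.List.pyRange k 0 (-1)) hmem [] [] none i
      (Or.inl ⟨rfl, rfl, rfl⟩)
    set stA := (PySem.List.pyRange k 0 (-1)).foldl stepA ([], i) with hstA
    set stB := (PySem.List.pyRange k 0 (-1)).foldl stepB ([], none, i) with hstB
    have hlenL : (PySem.List.pyRange k 0 (-1)).length = k.toNat := by
      rw [PySem.List.length_pyRange_neg_one]; omega
    rw [hlenL] at hlen
    simp only [List.length_nil, Nat.zero_add] at hlen
    rcases hInv with ⟨_, hsa, _⟩ | ⟨p, hp, hlast, hres⟩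
    · exfalso
      rw [hsa] at hlen
      simp at hlen
      omega
    · show (PySem.List.pyRange 0 k 1).map
          (fun j => PySem.List.pyGetD (stA.1 ++ [0]) j 0 -
            PySem.List.pyGetD (stA.1 ++ [0]) (j + 1) 0) =
        (match stB.2.1 with | none => stB.1 | some p => stB.1 ++ [p])
      have hRHS : (match stB.2.1 with | none => stB.1 | some p => stB.1 ++ [p]) =
          stB.1 ++ [p] := by rw [hp]
      have hlen' : (stA.1 ++ [(0 : Int)]).length = (k.toNat - 1) + 1 + 1 := by
        simp [hlen]; omega
      have hmap := map_pyRange_pairDiffs ((k.toNat - 1) + 1) (stA.1 ++ [(0 : Int)]) hlen'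
      have hcast : (((k.toNat - 1) + 1 : Nat) : Int) = k := by omega
      rw [hcast] at hmap
      rw [hRHS, hmap, pairDiffs_append_last stA.1 p 0 hlast, hres]
      norm_num
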